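-- pv_equiv track=rewrite | github.com/Kyoung-yeon99/Jump_to_Algorithm | Jump_to_Algorithm2/week27/eunbiPark/롤케이크_자르기.py | solution
-- ===== SOURCE A (Python) =====
-- from collections import Counter
--
-- def solution(topping):
--     ans = 0
--     one = Counter(topping)
--     two = set()
--
--     for t in topping:
--         one[t] -= 1
--         two.add(t)
--
--         if one[t] == 0:
--             one.pop(t)
--
--         if len(one) == len(two):
--             ans += 1
--
--     return ans
-- ===== SOURCE B (Python) =====
-- def solution(topping):
--     n = len(topping)
--     suffix_cnt = [0] * n
--     seen = set()
--     for i in range(n - 1, -1, -1):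
--         suffix_cnt[i] = len(seen)
--         seen.add(topping[i])
--     ans = 0
--     left = set()
--     for t, sc in zip(topping, suffix_cnt):
--         left.add(t)
--         if len(left) == sc:
--             ans += 1
--     return ans
-- ===== Notes on version B (the rewrite author's own statement) =====
-- stated objective: alternative
-- what changed: Replaces A's fused single pass that maintains a live Counter of the not-yet-seen toppings (decrement, pop at zero, compare dict size with the left set) by two independent passes: a right-to-left scan materializing a suffix-distinct-count table from a growing set, then a left-to-right scan comparing the growing left set's size against that table.
import Mathlib
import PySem

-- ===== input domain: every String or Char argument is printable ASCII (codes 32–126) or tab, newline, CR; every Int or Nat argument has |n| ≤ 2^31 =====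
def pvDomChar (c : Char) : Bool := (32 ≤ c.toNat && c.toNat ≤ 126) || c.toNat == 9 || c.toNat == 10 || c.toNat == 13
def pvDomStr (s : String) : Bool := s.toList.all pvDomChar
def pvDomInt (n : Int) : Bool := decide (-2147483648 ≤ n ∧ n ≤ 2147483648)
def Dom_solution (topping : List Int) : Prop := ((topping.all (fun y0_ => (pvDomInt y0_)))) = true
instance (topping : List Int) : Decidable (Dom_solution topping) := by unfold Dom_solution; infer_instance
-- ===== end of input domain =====

-- B replaces A's fused pass over a live Counter by two passes: a right-to-left scan building a
-- suffix-distinct-count table, then a forward scan comparing the left set's size with that table.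
-- Both are O(n); the claim is a different decomposition, not speed.

-- ===== PORT A =====
-- A: one = Counter(topping); for t in topping: one[t] -= 1; two.add(t); if one[t]==0: one.pop(t);
--    if len(one)==len(two): ans += 1
def solution (topping : List Int) : Int :=
  (topping.foldl
    (fun (st : Int × PySem.Dict Int Int × PySem.Set Int) t =>
      let one := st.2.1.modify t 0 (fun v => v - 1)                   -- one[t] -= 1 (Counter default 0)
      let two := PySem.Set.add st.2.2 t                               -- two.add(t)
      let one := if one.getD t 0 = 0 then one.erase t else one        -- if one[t] == 0: one.pop(t)
      let ans := if one.size = two.length then st.1 + 1 else st.1     -- if len(one) == len(two): ans += 1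
      (ans, one, two))
    (0, PySem.Dict.counter topping, PySem.Set.empty)).1

-- ===== PORT B =====
-- B: backward pass records len(seen) for each index (suffix distinct count), then a forward pass
--    compares len(left) with the recorded table.
def solution_alt (topping : List Int) : Int :=
  let suffix_cnt :=
    (topping.reverse.foldl
      (fun (st : PySem.Set Int × List Int) t =>
        (PySem.Set.add st.1 t, ((st.1.length : Int)) :: st.2))
      (PySem.Set.empty, [])).2
  ((topping.zip suffix_cnt).foldl
    (fun (st : PySem.Set Int × Int) p =>
      let left := PySem.Set.add st.1 p.1
      (left, if (left.length : Int) = p.2 then st.2 + 1 else st.2))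
    (PySem.Set.empty, 0)).2

-- ===== PRECONDITION & SPEC =====
def Spec_solution (topping : List Int) (out : Int) : Prop := out = solution_alt topping
instance (topping : List Int) (out : Int) : Decidable (Spec_solution topping out) := by unfold Spec_solution; infer_instance

-- ===== CLAIM (what is proved, stated in full; the proofs are below) =====
def Claim_equal_solution : Prop := ∀ (topping : List Int), Dom_solution topping → Spec_solution topping (solution topping)

-- ===== LEMMAS AND PROOFS =====

-- distinct-element count of a list
def dcnt (l : List Int) : Nat := (PySem.Set.ofList l).length

-- the suffix-distinct table B builds, characterized structurally
def sfx : List Int → List Int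
  | [] => []
  | _ :: r => ((dcnt r : Int)) :: sfx r

-- common value of both loops: running left set, +1 whenever |left| = distinct count of the suffix
def gAux : List Int → PySem.Set Int → Int
  | [], _ => 0
  | t :: r, two =>
      (if (PySem.Set.add two t).length = dcnt r then 1 else 0) + gAux r (PySem.Set.add two t)

-- ---- generic facts about Dict.erase (no erase lemmas in the prelude) ----
theorem pv_get?_erase_self (d : PySem.Dict Int Int) (k : Int) :
    (d.erase k).get? k = none := by
  obtain ⟨items⟩ := d
  induction items with
  | nil => rfl
  | cons p rest ih =>
    by_cases h : p.1 = k
    · have he : (PySem.Dict.mk (p :: rest)).erase k = (PySem.Dict.mk rest).erase k := by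
        simp [PySem.Dict.erase, h]
      rw [he]; exact ih
    · have he : (PySem.Dict.mk (p :: rest)).erase k
          = PySem.Dict.mk (p :: ((PySem.Dict.mk rest).erase k).items) := by
        simp [PySem.Dict.erase, h]
      rw [he, PySem.Dict.get?_mk_cons]
      simpa [h] using ih

theorem pv_get?_erase_of_ne (d : PySem.Dict Int Int) (k x : Int) (h : x ≠ k) :
    (d.erase k).get? x = d.get? x := by
  obtain ⟨items⟩ := d
  induction items with
  | nil => rfl
  | cons p rest ih =>
    by_cases hp : p.1 = k
    · have he : (PySem.Dict.mk (p :: rest)).erase k = (PySem.Dict.mk rest).erase k := by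
        simp [PySem.Dict.erase, hp]
      rw [he, ih, PySem.Dict.get?_mk_cons]
      have : ¬ p.1 = x := by rw [hp]; exact fun hx => h hx.symm
      simp [this]
    · have he : (PySem.Dict.mk (p :: rest)).erase k
          = PySem.Dict.mk (p :: ((PySem.Dict.mk rest).erase k).items) := by
        simp [PySem.Dict.erase, hp]
      rw [he, PySem.Dict.get?_mk_cons, PySem.Dict.get?_mk_cons]
      by_cases hx : p.1 = x
      · simp [hx]
      · simpa [hx] using ih

theorem pv_nodup_keys_erase (d : PySem.Dict Int Int) (k : Int) (h : d.keys.Nodup) :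
    (d.erase k).keys.Nodup := by
  have h1 : (d.erase k).items.Sublist d.items := by
    simp only [PySem.Dict.erase]
    exact List.filter_sublist
  have h2 : ((d.erase k).items.map Prod.fst).Sublist (d.items.map Prod.fst) := h1.map _
  simp only [PySem.Dict.keys] at h ⊢
  exact h2.nodup h

theorem pv_size_eq_keys_length (d : PySem.Dict Int Int) : d.size = d.keys.length := by
  simp [PySem.Dict.size, PySem.Dict.keys]

-- keys nodup + key set = elements of r  ⇒  size = distinct count of r
theorem pv_size_eq_dcnt (d : PySem.Dict Int Int) (r : List Int)
    (hnd : d.keys.Nodup) (hmem : ∀ x, x ∈ d.keys ↔ x ∈ r) : d.size = dcnt r := by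
  have hperm : d.keys.Perm (PySem.Set.ofList r) := by
    rw [List.perm_ext_iff_of_nodup hnd (PySem.Set.nodup_ofList r)]
    intro a
    rw [hmem a, PySem.Set.mem_ofList]
  rw [pv_size_eq_keys_length]
  exact hperm.length_eq

theorem pv_dcnt_reverse (l : List Int) : dcnt l.reverse = dcnt l := by
  have hperm : (PySem.Set.ofList l.reverse).Perm (PySem.Set.ofList l) := by
    rw [List.perm_ext_iff_of_nodup (PySem.Set.nodup_ofList _) (PySem.Set.nodup_ofList _)]
    intro a
    simp [PySem.Set.mem_ofList]
  exact hperm.length_eq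

-- counter characterization through get?
theorem pv_get?_counter (l : List Int) (x : Int) :
    (PySem.Dict.counter l).get? x = if l.count x = 0 then none else some ((l.count x : Int)) := by
  by_cases h : l.count x = 0
  · rw [if_pos h, PySem.Dict.get?_eq_none_iff_not_mem_keys, PySem.Dict.keys_counter,
        PySem.Set.mem_ofList]
    exact List.count_eq_zero.mp h
  · rw [if_neg h]
    have hmem : x ∈ l := by
      rw [← List.count_pos_iff]; omega
    have hk : x ∈ (PySem.Dict.counter l).keys := by
      rw [PySem.Dict.keys_counter, PySem.Set.mem_ofList]; exact hmem
    have hne : (PySem.Dict.counter l).get? x ≠ none := by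
      simp only [ne_eq, PySem.Dict.get?_eq_none_iff_not_mem_keys, not_not]
      exact hk
    obtain ⟨v, hv⟩ := Option.ne_none_iff_exists'.mp hne
    have hd := PySem.Dict.getD_counter l x
    rw [PySem.Dict.getD_eq_get?_getD, hv, Option.getD_some] at hd
    rw [hv, hd]

-- ---- B's backward loop produces sfx ----
def fAux : List Int → PySem.Set Int → List Int
  | [], _ => []
  | t :: l, seen => fAux l (PySem.Set.add seen t) ++ [((seen.length : Int))]

theorem pv_bsnd (l : List Int) (seen : PySem.Set Int) (acc : List Int) :
    (l.foldl (fun (st : PySem.Set Int × List Int) t =>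
        (PySem.Set.add st.1 t, ((st.1.length : Int)) :: st.2)) (seen, acc)).2
      = fAux l seen ++ acc := by
  induction l generalizing seen acc with
  | nil => simp [fAux]
  | cons t l ih =>
    simp only [List.foldl_cons]
    rw [ih]
    simp [fAux, List.append_assoc]

theorem pv_fAux_append (a b : List Int) (s : PySem.Set Int) :
    fAux (a ++ b) s = fAux b (a.foldl PySem.Set.add s) ++ fAux a s := by
  induction a generalizing s with
  | nil => simp [fAux]
  | cons x a ih =>
    simp [fAux, ih, List.append_assoc]

theorem pv_fAux_rev (l : List Int) : fAux l.reverse PySem.Set.empty = sfx l := by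
  induction l with
  | nil => rfl
  | cons t l ih =>
    rw [List.reverse_cons, pv_fAux_append, ih]
    have hfold : List.foldl PySem.Set.add PySem.Set.empty l.reverse = PySem.Set.ofList l.reverse :=
      (PySem.Set.ofList_eq_foldl l.reverse).symm
    have hlen : ((List.foldl PySem.Set.add PySem.Set.empty l.reverse).length : Int)
        = ((dcnt l : Nat) : Int) := by
      rw [hfold]
      have h2 := pv_dcnt_reverse l
      unfold dcnt at h2 ⊢
      exact_mod_cast h2
    simp only [fAux, List.nil_append, List.cons_append, sfx]
    rw [hlen]

-- ---- B's forward loop computes gAux ----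
theorem pv_lemB (r : List Int) (left : PySem.Set Int) (ans : Int) :
    ((r.zip (sfx r)).foldl
      (fun (st : PySem.Set Int × Int) p =>
        let l' := PySem.Set.add st.1 p.1
        (l', if (l'.length : Int) = p.2 then st.2 + 1 else st.2)) (left, ans)).2
      = ans + gAux r left := by
  induction r generalizing left ans with
  | nil => simp [gAux, sfx]
  | cons t r ih =>
    simp only [sfx, List.zip_cons_cons, List.foldl_cons]
    rw [ih]
    simp only [gAux]
    by_cases h : (PySem.Set.add left t).length = dcnt r
    · rw [if_pos (by exact_mod_cast h), if_pos h]; ring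
    · rw [if_neg (by exact_mod_cast h), if_neg h]; ring

-- ---- A's loop computes gAux under the Counter-of-the-suffix invariant ----
theorem pv_lemA (r : List Int) (d : PySem.Dict Int Int) (two : PySem.Set Int) (ans : Int)
    (hnd : d.keys.Nodup)
    (hinv : ∀ x, d.get? x = if r.count x = 0 then none else some ((r.count x : Int))) :
    (r.foldl
      (fun (st : Int × PySem.Dict Int Int × PySem.Set Int) t =>
        let one := st.2.1.modify t 0 (fun v => v - 1)
        let two := PySem.Set.add st.2.2 t
        let one := if one.getD t 0 = 0 then one.erase t else one
        let ans := if one.size = two.length then st.1 + 1 else st.1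
        (ans, one, two))
      (ans, d, two)).1 = ans + gAux r two := by
  induction r generalizing d two ans with
  | nil => simp [gAux]
  | cons t r ih =>
    have hget : d.get? t = some (((r.count t : Nat) : Int) + 1) := by
      have := hinv t
      rw [List.count_cons_self] at this
      rw [this, if_neg (by omega)]
      push_cast
      ring_nf
    have hgd : d.getD t 0 = ((r.count t : Nat) : Int) + 1 := by
      rw [PySem.Dict.getD_eq_get?_getD, hget, Option.getD_some]
    have hmod : d.modify t 0 (fun v => v - 1) = d.insert t (d.getD t 0 - 1) := rfl
    have hgd1 : (d.modify t 0 (fun v => v - 1)).getD t 0 = ((r.count t : Nat) : Int) := by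
      rw [hmod, PySem.Dict.getD_insert_self, hgd]; ring
    have hnd1 : (d.modify t 0 (fun v => v - 1)).keys.Nodup := by
      rw [hmod]; exact PySem.Dict.nodup_keys_insert d t _ hnd
    have hget1 : ∀ x, (d.modify t 0 (fun v => v - 1)).get? x
        = if r.count x = 0 ∧ x = t then some 0
          else if r.count x = 0 then none else some ((r.count x : Int)) := by
      intro x
      by_cases hx : x = t
      · subst hx
        rw [hmod, PySem.Dict.get?_insert_self, hgd]
        by_cases hz : r.count x = 0
        · rw [if_pos ⟨hz, rfl⟩, hz]; norm_num
        · rw [if_neg (by simp [hz]), if_neg hz]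
          push_cast; ring_nf
      · rw [hmod, PySem.Dict.get?_insert_of_ne d _ hx, hinv x,
            List.count_cons_of_ne (Ne.symm hx)]
        simp [hx]
    set d2 := if (d.modify t 0 (fun v => v - 1)).getD t 0 = 0
        then (d.modify t 0 (fun v => v - 1)).erase t
        else d.modify t 0 (fun v => v - 1) with hd2
    have hinv2 : ∀ x, d2.get? x = if r.count x = 0 then none else some ((r.count x : Int)) := by
      intro x
      rw [hd2]
      by_cases hz : r.count t = 0
      · rw [if_pos (by rw [hgd1, hz]; norm_num)]
        by_cases hx : x = t
        · subst hx
          rw [pv_get?_erase_self, if_pos hz]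
        · rw [pv_get?_erase_of_ne _ _ _ hx, hget1 x]
          simp [hx]
      · rw [if_neg (by rw [hgd1]; exact_mod_cast hz)]
        rw [hget1 x]
        by_cases hx : x = t
        · subst hx; simp [hz]
        · simp [hx]
    have hnd2 : d2.keys.Nodup := by
      rw [hd2]
      by_cases hz : (d.modify t 0 (fun v => v - 1)).getD t 0 = 0
      · rw [if_pos hz]; exact pv_nodup_keys_erase _ t hnd1
      · rw [if_neg hz]; exact hnd1
    have hsize : d2.size = dcnt r := by
      refine pv_size_eq_dcnt d2 r hnd2 ?_
      intro x
      constructor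
      · intro hx
        have : d2.get? x ≠ none := by
          simp only [ne_eq, PySem.Dict.get?_eq_none_iff_not_mem_keys, not_not]
          exact hx
        rw [hinv2 x] at this
        by_cases hz : r.count x = 0
        · exact absurd (if_pos hz) this
        · rw [← List.count_pos_iff]; omega
      · intro hx
        have hz : r.count x ≠ 0 := by
          rw [← List.count_pos_iff] at hx; omega
        have : d2.get? x ≠ none := by rw [hinv2 x, if_neg hz]; simp
        simpa only [ne_eq, PySem.Dict.get?_eq_none_iff_not_mem_keys, not_not] using this
    simp only [List.foldl_cons]
    rw [ih d2 (PySem.Set.add two t)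
        (if d2.size = (PySem.Set.add two t).length then ans + 1 else ans) hnd2 hinv2]
    simp only [gAux, hsize]
    by_cases h : (PySem.Set.add two t).length = dcnt r
    · rw [if_pos h.symm, if_pos h]; ring
    · rw [if_neg (fun hh => h hh.symm), if_neg h]; ring

-- ===== VERDICT (by name: the statement is the Claim_ definition above) =====
theorem solution_spec : Claim_equal_solution := by
  intro topping _
  unfold Spec_solution solution solution_alt
  rw [pv_lemA topping (PySem.Dict.counter topping) PySem.Set.empty 0
        (PySem.Dict.nodup_keys_counter topping) (pv_get?_counter topping),
      pv_bsnd, List.append_nil, pv_fAux_rev, pv_lemB]
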